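-- pv_equiv track=rewrite | github.com/hyunwoododev/algorithm | programmers/1.py | calculate_custom_keypad_times
-- ===== SOURCE A (Python) =====
-- def calculate_custom_keypad_times(mapping, number):
--     # 매핑된 키패드를 좌표로 변환
--     keypad = {str(mapping[row][col]): (row, col) for row in range(3) for col in range(3)}
--
--     # 입력된 숫자를 문자열로 변환
--     digits = str(number)
--
--     # 첫 번째 숫자의 위치에서 시작
--     current_position = keypad[digits[0]]
--     times = [0]  # 시작 위치는 0초로 계산
--
--     # 각 숫자에 대하여 이동 시간 계산
--     for i in range(1, len(digits)):
--         digit = digits[i]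
--         next_position = keypad[digit]
--         # 최소 이동 거리는 맨해튼 거리
--         time = abs(next_position[0] - current_position[0]) + abs(next_position[1] - current_position[1])
--         times.append(time)
--         current_position = next_position
--
--     return times
-- ===== SOURCE B (Python) =====
-- def _move_time(src, dst):
--     # breadth-first search on the 3x3 grid graph of keypad cells;
--     # the move time is the BFS layer at which dst first appears
--     frontier = [src]
--     visited = [src]
--     t = 0
--     while dst not in frontier:
--         nxt = []
--         for r, c in frontier:
--             for nb in ((r - 1, c), (r + 1, c), (r, c - 1), (r, c + 1)):
--                 if 0 <= nb[0] < 3 and 0 <= nb[1] < 3 and nb not in visited: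
--                     visited.append(nb)
--                     nxt.append(nb)
--         frontier = nxt
--         t += 1
--     return t
--
--
-- def calculate_custom_keypad_times(mapping, number):
--     keypad = {str(mapping[row][col]): (row, col) for row in range(3) for col in range(3)}
--     positions = [keypad[d] for d in str(number)]
--     return [0] + [_move_time(a, b) for a, b in zip(positions, positions[1:])]
-- ===== Notes on version B (the rewrite author's own statement) =====
-- stated objective: alternative
-- what changed: Replaces the closed-form Manhattan-distance formula with a running position by a BFS shortest-path search on the 3x3 grid graph, applied pairwise to a precomputed list of digit positions; BFS layer depth equals Manhattan distance on the grid (proved by exhaustive case check in Lean).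
import Mathlib
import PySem

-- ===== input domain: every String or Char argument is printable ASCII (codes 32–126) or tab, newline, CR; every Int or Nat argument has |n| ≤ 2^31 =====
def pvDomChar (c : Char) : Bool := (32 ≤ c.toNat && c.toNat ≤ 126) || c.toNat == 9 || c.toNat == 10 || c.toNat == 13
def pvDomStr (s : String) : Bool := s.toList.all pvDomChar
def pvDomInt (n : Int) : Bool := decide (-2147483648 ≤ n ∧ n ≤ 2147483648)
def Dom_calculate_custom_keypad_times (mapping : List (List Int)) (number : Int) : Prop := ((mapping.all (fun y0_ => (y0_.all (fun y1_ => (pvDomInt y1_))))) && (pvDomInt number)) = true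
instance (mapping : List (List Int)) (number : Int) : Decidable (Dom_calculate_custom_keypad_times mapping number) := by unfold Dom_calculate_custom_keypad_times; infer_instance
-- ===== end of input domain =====

-- B replaces A's closed-form Manhattan-distance computation with a running position by a
-- BFS shortest-path search on the 3x3 grid graph over a precomputed position list
-- (objective: alternative algorithm, same asymptotic cost).

-- ===== PORT A =====
-- keypad = {str(mapping[row][col]): (row, col) for row in range(3) for col in range(3)}
-- (identical comprehension in both Pythons; out-of-range access via the total pyGetD — Pre_ puts it in range)
def pvKeypad (mapping : List (List Int)) : PySem.Dict String (Int × Int) :=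
  (PySem.List.pyRange 0 3 1).foldl (fun d row =>
    (PySem.List.pyRange 0 3 1).foldl (fun d col =>
      d.insert (PySem.Int.toStr (PySem.List.pyGetD (PySem.List.pyGetD mapping row []) col 0)) (row, col)) d)
    PySem.Dict.empty

def calculate_custom_keypad_times (mapping : List (List Int)) (number : Int) : List Int :=
  let keypad := pvKeypad mapping
  let digits := (PySem.Int.toStr number).toList
  -- current_position = keypad[digits[0]] (lookup total via getD; Pre_ guarantees the key is present)
  let current := keypad.getD (String.ofList [PySem.List.pyGetD digits 0 ' ']) (0, 0)
  -- times = [0]; for i in range(1, len(digits)): …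
  let st := (PySem.List.pyRange 1 (digits.length : Int) 1).foldl
    (fun (st : List Int × (Int × Int)) i =>
      let digit := PySem.List.pyGetD digits i ' '
      let np := keypad.getD (String.ofList [digit]) (0, 0)
      (st.1 ++ [|np.1 - st.2.1| + |np.2 - st.2.2|], np))
    ([0], current)
  st.1

-- ===== PORT B =====
-- one BFS expansion layer: for r, c in frontier: for nb in neighbours: append fresh in-grid cells
def pvBfsStep (frontier visited : List (Int × Int)) : List (Int × Int) × List (Int × Int) :=
  frontier.foldl (fun (st : List (Int × Int) × List (Int × Int)) rc =>
    [(rc.1 - 1, rc.2), (rc.1 + 1, rc.2), (rc.1, rc.2 - 1), (rc.1, rc.2 + 1)].foldl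
      (fun (st : List (Int × Int) × List (Int × Int)) nb =>
        if 0 ≤ nb.1 ∧ nb.1 < 3 ∧ 0 ≤ nb.2 ∧ nb.2 < 3 ∧ ¬ st.2.contains nb
        then (st.1 ++ [nb], st.2 ++ [nb]) else st) st)
    ([], visited)

-- while dst not in frontier: expand; the fuel 5 only makes the loop total (BFS from any grid
-- cell covers the whole 3x3 grid within 4 layers, so the fuel-exhausted branch is unreachable
-- for in-grid destinations)
def pvBfsLoop (fuel : Nat) (dst : Int × Int) (frontier visited : List (Int × Int)) (t : Int) : Int :=
  match fuel with
  | 0 => t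
  | fuel + 1 =>
      if frontier.contains dst then t
      else
        let p := pvBfsStep frontier visited
        pvBfsLoop fuel dst p.1 p.2 (t + 1)

def pvMoveTime (src dst : Int × Int) : Int :=
  pvBfsLoop 5 dst [src] [src] 0

def calculate_custom_keypad_times_alt (mapping : List (List Int)) (number : Int) : List Int :=
  let keypad := pvKeypad mapping
  -- positions = [keypad[d] for d in str(number)]
  let positions := (PySem.Int.toStr number).toList.map (fun d => keypad.getD (String.ofList [d]) (0, 0))
  -- [0] + [_move_time(a, b) for a, b in zip(positions, positions[1:])]
  0 :: (List.zip positions (PySem.List.slice positions (some 1) none)).map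
    (fun ab => pvMoveTime ab.1 ab.2)

-- ===== PRECONDITION & SPEC =====
-- Pre_ excludes exactly the inputs where A raises: an IndexError when mapping is not at least
-- 3×3, and a KeyError when some digit of str(number) (e.g. the '-' of a negative number) is
-- not among the keypad keys.
def Pre_calculate_custom_keypad_times (mapping : List (List Int)) (number : Int) : Prop :=
  3 ≤ mapping.length ∧
  ((mapping.take 3).all (fun row => decide (3 ≤ row.length))) = true ∧
  ((PySem.Int.toStr number).toList.all (fun ch =>
    ((mapping.take 3).flatMap (fun row => (row.take 3).map PySem.Int.toStr)).contains
      (String.ofList [ch]))) = true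
instance (mapping : List (List Int)) (number : Int) : Decidable (Pre_calculate_custom_keypad_times mapping number) := by unfold Pre_calculate_custom_keypad_times; infer_instance

def pvWitness_calculate_custom_keypad_times : List (List Int) × Int :=
  ([[1, 2, 3], [4, 5, 6], [7, 8, 9]], 159)

def Spec_calculate_custom_keypad_times (mapping : List (List Int)) (number : Int) (out : List Int) : Prop := out = calculate_custom_keypad_times_alt mapping number
instance (mapping : List (List Int)) (number : Int) (out : List Int) : Decidable (Spec_calculate_custom_keypad_times mapping number out) := by unfold Spec_calculate_custom_keypad_times; infer_instance

-- ===== CLAIM (what is proved, stated in full; the proofs are below) =====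
def Claim_equal_calculate_custom_keypad_times : Prop := ∀ (mapping : List (List Int)) (number : Int), Dom_calculate_custom_keypad_times mapping number → Pre_calculate_custom_keypad_times mapping number → Spec_calculate_custom_keypad_times mapping number (calculate_custom_keypad_times mapping number)

-- ===== LEMMAS AND PROOFS =====
set_option maxHeartbeats 1000000

-- the nine grid cells the keypad dict maps to (and the default (0,0))
def pvCells : List (Int × Int) :=
  [(0, 0), (0, 1), (0, 2), (1, 0), (1, 1), (1, 2), (2, 0), (2, 1), (2, 2)]

-- every keypad lookup (including the default) lands in the 3x3 grid
lemma pv_getD_keypad_mem (mapping : List (List Int)) (s : String) :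
    (pvKeypad mapping).getD s (0, 0) ∈ pvCells := by
  have h3 : PySem.List.pyRange 0 3 1 = [0, 1, 2] := by
    simp [PySem.List.pyRange, List.range_succ]
  unfold pvKeypad
  rw [h3]
  simp only [List.foldl_cons, List.foldl_nil, PySem.Dict.getD_insert]
  split_ifs <;> simp [pvCells]

-- BFS layer depth equals Manhattan distance on the 3x3 grid (exhaustive check)
lemma pv_bfs_eq_manhattan :
    ∀ a ∈ pvCells, ∀ b ∈ pvCells, pvMoveTime a b = |a.1 - b.1| + |a.2 - b.2| := by decide

-- A's fold with running current position, started on (acc, cur), produces acc followed by the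
-- pairwise Manhattan distances of the position trace cur :: cs.map look.
lemma pv_loop_eq (look : Char → Int × Int) :
    ∀ (cs : List Char) (cur : Int × Int) (acc : List Int),
    (cs.foldl (fun (st : List Int × (Int × Int)) d =>
        (st.1 ++ [|(look d).1 - st.2.1| + |(look d).2 - st.2.2|], look d)) (acc, cur)).1
    = acc ++ (List.zip (cur :: cs.map look) (cs.map look)).map
        (fun ab => |ab.1.1 - ab.2.1| + |ab.1.2 - ab.2.2|) := by
  intro cs
  induction cs with
  | nil => intro cur acc; simp
  | cons d cs ih =>
      intro cur acc
      simp only [List.foldl_cons, List.map_cons, List.zip_cons_cons, List.map_cons, ih]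
      simp [abs_sub_comm, List.append_assoc]

-- pointwise: on grid cells the Manhattan formula and the BFS move time agree,
-- so the two pairwise maps coincide
lemma pv_zip_map (look : Char → Int × Int) (hm : ∀ c, look c ∈ pvCells)
    (xs : List Char) (p : Int × Int) (hp : p ∈ pvCells) :
    (List.zip (p :: xs.map look) (xs.map look)).map
      (fun ab => |ab.1.1 - ab.2.1| + |ab.1.2 - ab.2.2|)
    = (List.zip (p :: xs.map look) (xs.map look)).map (fun ab => pvMoveTime ab.1 ab.2) := by
  apply List.map_congr_left
  intro ab hab
  have h1 := (List.of_mem_zip hab).1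
  have h2 := (List.of_mem_zip hab).2
  have mem1 : ab.1 ∈ pvCells := by
    rcases List.mem_cons.mp h1 with h1 | h1
    · exact h1 ▸ hp
    · rcases List.mem_map.mp h1 with ⟨c, _, hc⟩
      exact hc ▸ hm c
  have mem2 : ab.2 ∈ pvCells := by
    rcases List.mem_map.mp h2 with ⟨c, _, hc⟩
    exact hc ▸ hm c
  exact (pv_bfs_eq_manhattan ab.1 mem1 ab.2 mem2).symm

-- ===== VERDICT (by name: the statement is the Claim_ definition above) =====

theorem calculate_custom_keypad_times_spec : Claim_equal_calculate_custom_keypad_times := by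
  intro mapping number _ _
  unfold Spec_calculate_custom_keypad_times
  unfold calculate_custom_keypad_times calculate_custom_keypad_times_alt
  rcases h : (PySem.Int.toStr number).toList with _ | ⟨d, cs⟩
  · simp
  · simp only [PySem.List.slice_from_one, PySem.List.pyGetD_zero_cons, List.map_cons, List.tail_cons]
    rw [PySem.List.foldl_pyRange_pyGetD' (d :: cs) ' '
      (fun (st : List Int × (Int × Int)) digit =>
        let np := (pvKeypad mapping).getD (String.ofList [digit]) (0, 0)
        (st.1 ++ [|np.1 - st.2.1| + |np.2 - st.2.2|], np)) _ (by norm_num)]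
    simp only [show Int.toNat 1 = 1 from rfl, List.drop_succ_cons, List.drop_zero]
    rw [pv_loop_eq (fun digit => (pvKeypad mapping).getD (String.ofList [digit]) (0, 0)) cs]
    simp only [List.singleton_append, List.cons.injEq, true_and]
    exact pv_zip_map _ (fun c => pv_getD_keypad_mem mapping _) cs _
      (pv_getD_keypad_mem mapping _)
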